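-- pv_equiv track=rewrite | github.com/fbscarel/shmupfetch | src/mdk.py | get_base_rom_name
-- ===== SOURCE A (Python) =====
-- def get_base_rom_name(rom_name: str) -> str:
--     """Get the base ROM name without region/version suffixes.
--
--     Examples:
--         gunbirdj -> gunbird
--         bgaregganv -> bgaregga
--         batriderja -> batrider
--         s1945ii -> s1945ii (no suffix)
--     """
--     # Compound suffixes first (most specific), then single char
--     # Order matters: check longer suffixes first
--     suffixes = [
--         # 3+ char compound suffixes
--         "blk", "blka", "blkb",
--         # 2-char compound suffixes (region + version)
--         "ja", "jb", "jc", "ua", "ub", "ka", "kb", "ea", "eb",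
--         # 2-char region codes
--         "hk", "tw", "kr", "nv", "bl", "sp", "cn",
--         # Single char (region/version)
--         "j", "u", "k", "a", "b", "c", "e", "t", "o",
--     ]
--
--     for suffix in suffixes:
--         if rom_name.endswith(suffix) and len(rom_name) > len(suffix) + 3:
--             base = rom_name[: -len(suffix)]
--             # Only strip if remaining name looks valid (not too short)
--             if len(base) >= 4:
--                 return base
--
--     return rom_name
-- ===== SOURCE B (Python) =====
-- def get_base_rom_name(rom_name: str) -> str:
--     """Get the base ROM name without region/version suffixes."""
--     # Suffixes grouped by length; within each length at most one can match,
--     # so one set lookup per length replaces the 28-entry ordered scan.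
--     groups = {
--         4: {"blka", "blkb"},
--         3: {"blk"},
--         2: {"ja", "jb", "jc", "ua", "ub", "ka", "kb", "ea", "eb",
--             "hk", "tw", "kr", "nv", "bl", "sp", "cn"},
--         1: {"j", "u", "k", "a", "b", "c", "e", "t", "o"},
--     }
--     for L in (4, 3, 2, 1):
--         if len(rom_name) > L + 3 and rom_name[-L:] in groups[L]:
--             return rom_name[:-L]
--     return rom_name
-- ===== Notes on version B (the rewrite author's own statement) =====
-- stated objective: simpler
-- what changed: Replaces the ordered 28-suffix scan with a redundant inner length check by four length-indexed suffix sets probed in descending length order, one slice-and-lookup per length.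
import Mathlib
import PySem

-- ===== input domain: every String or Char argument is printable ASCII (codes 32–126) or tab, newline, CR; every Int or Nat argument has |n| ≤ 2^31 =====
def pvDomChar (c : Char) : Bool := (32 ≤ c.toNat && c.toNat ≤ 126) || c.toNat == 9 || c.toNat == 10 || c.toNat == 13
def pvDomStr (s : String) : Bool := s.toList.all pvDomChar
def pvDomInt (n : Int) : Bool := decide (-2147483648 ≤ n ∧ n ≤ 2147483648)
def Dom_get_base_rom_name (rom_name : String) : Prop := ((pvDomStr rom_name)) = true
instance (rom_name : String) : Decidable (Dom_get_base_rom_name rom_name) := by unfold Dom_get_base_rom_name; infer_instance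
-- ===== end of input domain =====

-- B replaces A's ordered 28-suffix scan by four length-indexed suffix sets probed in
-- descending length order (objective: simpler).

-- ===== PORT A =====
def pvSuffixesA : List String :=
  ["blk", "blka", "blkb",
   "ja", "jb", "jc", "ua", "ub", "ka", "kb", "ea", "eb",
   "hk", "tw", "kr", "nv", "bl", "sp", "cn",
   "j", "u", "k", "a", "b", "c", "e", "t", "o"]

def pvALoop (s : String) : List String → String
  | [] => s
  | suf :: rest =>
    if PySem.Str.endswith s suf = true ∧ PySem.Str.len s > PySem.Str.len suf + 3 then
      let base := PySem.Str.slice s none (some (-(PySem.Str.len suf : Int)))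
      if PySem.Str.len base ≥ 4 then base else pvALoop s rest
    else pvALoop s rest

def get_base_rom_name (rom_name : String) : String := pvALoop rom_name pvSuffixesA

-- ===== PORT B =====
def pvGroup : Nat → List String
  | 4 => ["blka", "blkb"]
  | 3 => ["blk"]
  | 2 => ["ja", "jb", "jc", "ua", "ub", "ka", "kb", "ea", "eb",
          "hk", "tw", "kr", "nv", "bl", "sp", "cn"]
  | 1 => ["j", "u", "k", "a", "b", "c", "e", "t", "o"]
  | _ => []

def pvBLoop (s : String) : List Nat → String
  | [] => s
  | L :: rest =>
    if PySem.Str.len s > L + 3 ∧ (pvGroup L).contains (PySem.Str.slice s (some (-(L : Int))) none) = true then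
      PySem.Str.slice s none (some (-(L : Int)))
    else pvBLoop s rest

def get_base_rom_name_alt (rom_name : String) : String := pvBLoop rom_name [4, 3, 2, 1]

-- ===== PRECONDITION & SPEC =====
def Spec_get_base_rom_name (rom_name : String) (out : String) : Prop := out = get_base_rom_name_alt rom_name
instance (rom_name : String) (out : String) : Decidable (Spec_get_base_rom_name rom_name out) := by unfold Spec_get_base_rom_name; infer_instance

-- ===== CLAIM (what is proved, stated in full; the proofs are below) =====
def Claim_equal_get_base_rom_name : Prop := ∀ (rom_name : String), Dom_get_base_rom_name rom_name → Spec_get_base_rom_name rom_name (get_base_rom_name rom_name)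

-- ===== LEMMAS AND PROOFS =====

-- "suffix matches and the length guard holds", as one Boolean test
def pvHit (s suf : String) : Bool :=
  PySem.Str.endswith s suf && decide (PySem.Str.len s > PySem.Str.len suf + 3)

theorem pvHit_iff (s suf : String) :
    pvHit s suf = true ↔
      (PySem.Str.endswith s suf = true ∧ PySem.Str.len s > PySem.Str.len suf + 3) := by
  simp [pvHit]

theorem endswith_suffix {s suf : String} (h : PySem.Str.endswith s suf = true) :
    suf.toList <:+ s.toList := by
  rw [← PySem.Chars.endswith_iff]
  simpa [pysem] using h

theorem strip_len (s suf : String) (hk : 0 < PySem.Str.len suf)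
    (h : PySem.Str.len s > PySem.Str.len suf + 3) :
    PySem.Str.len (PySem.Str.slice s none (some (-(PySem.Str.len suf : Int)))) ≥ 4 := by
  simp only [PySem.Str.len_eq, PySem.Str.toList_slice, PySem.Chars.slice_eq_listSlice] at *
  rw [PySem.List.slice_to_neg_natCast _ _ (by exact_mod_cast hk)]
  simp only [List.length_take]
  omega

-- A's loop is a first-match search with the redundant inner check removed
theorem aLoop_eq (s : String) (l : List String) (hpos : ∀ suf ∈ l, 0 < PySem.Str.len suf) :
    pvALoop s l =
      match l.find? (pvHit s) with
      | some suf => PySem.Str.slice s none (some (-(PySem.Str.len suf : Int)))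
      | none => s := by
  induction l with
  | nil => simp [pvALoop]
  | cons suf rest ih =>
    by_cases hh : pvHit s suf = true
    · obtain ⟨h1, h2⟩ := (pvHit_iff s suf).mp hh
      have h4 := strip_len s suf (hpos suf (by simp)) h2
      rw [List.find?_cons_of_pos hh]
      simp only [pvALoop]
      split_ifs with hc1
      · rfl
      · exact absurd ⟨h1, h2⟩ hc1
    · have h' : ¬ (PySem.Str.endswith s suf = true ∧ PySem.Str.len s > PySem.Str.len suf + 3) := by
        rw [← pvHit_iff]; simp [hh]
      rw [List.find?_cons_of_neg hh]
      simp only [pvALoop]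
      rw [if_neg h']
      exact ih (fun x hx => hpos x (by simp [hx]))

theorem slice_eq_iff (s suf : String) (L : Nat) (hL0 : 0 < L)
    (hL : suf.toList.length = L) :
    PySem.Str.slice s (some (-(L : Int))) none = suf ↔ PySem.Str.endswith s suf = true := by
  have hdrop : (PySem.Str.slice s (some (-(L : Int))) none).toList
      = s.toList.drop (s.toList.length - L) := by
    simp only [PySem.Str.toList_slice, PySem.Chars.slice_eq_listSlice]
    exact PySem.List.slice_from_neg_natCast _ _ hL0
  constructor
  · intro h
    rw [h] at hdrop
    have hsuffix : suf.toList <:+ s.toList := by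
      rw [List.suffix_iff_eq_drop, hL]; exact hdrop
    have h2 : PySem.Chars.endswith s.toList suf.toList = true := by
      rw [PySem.Chars.endswith_iff]; exact hsuffix
    simpa [pysem] using h2
  · intro h
    have hsuf := endswith_suffix h
    rw [List.suffix_iff_eq_drop, hL] at hsuf
    apply String.toList_inj.mp
    rw [hdrop, ← hsuf]

-- one iteration of B's loop is a first-match search over that length's suffix set
theorem bLoop_cons (s : String) (L : Nat) (rest : List Nat) (hL0 : 0 < L)
    (hg : ∀ suf ∈ pvGroup L, suf.toList.length = L) :
    pvBLoop s (L :: rest) =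
      match (pvGroup L).find? (pvHit s) with
      | some suf => PySem.Str.slice s none (some (-(PySem.Str.len suf : Int)))
      | none => pvBLoop s rest := by
  by_cases hlen : PySem.Str.len s > L + 3
  · have hnL : L ≤ s.toList.length := by
      rw [PySem.Str.len_eq] at hlen; omega
    by_cases hc : (pvGroup L).contains (PySem.Str.slice s (some (-(L : Int))) none) = true
    · have hmem : PySem.Str.slice s (some (-(L : Int))) none ∈ pvGroup L := by
        simpa using hc
      have hhit : pvHit s (PySem.Str.slice s (some (-(L : Int))) none) = true := by
        rw [pvHit_iff]
        refine ⟨(slice_eq_iff s _ L hL0 (hg _ hmem)).mp rfl, ?_⟩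
        have hlen' : PySem.Str.len (PySem.Str.slice s (some (-(L : Int))) none) = (L : Int) := by
          rw [PySem.Str.len_eq, hg _ hmem]
        omega
      cases hfind : (pvGroup L).find? (pvHit s) with
      | none =>
        exfalso
        exact absurd hhit (by simpa using (List.find?_eq_none.mp hfind _ hmem))
      | some suf' =>
        have hhit' := List.find?_some hfind
        have hmem' := List.mem_of_find?_eq_some hfind
        obtain ⟨he', hl'⟩ := (pvHit_iff s suf').mp hhit'
        have heq' : PySem.Str.slice s (some (-(L : Int))) none = suf' :=
          (slice_eq_iff s suf' L hL0 (hg _ hmem')).mpr he'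
        have hlen' : PySem.Str.len suf' = (L : Int) := by
          rw [PySem.Str.len_eq, hg _ hmem']
        simp only [pvBLoop]
        rw [if_pos ⟨hlen, hc⟩, hlen']
    · have hfind : (pvGroup L).find? (pvHit s) = none := by
        rw [List.find?_eq_none]
        intro suf hmem
        by_contra hne
        have hhit : pvHit s suf = true := by simpa using hne
        obtain ⟨he, _⟩ := (pvHit_iff s suf).mp hhit
        have : PySem.Str.slice s (some (-(L : Int))) none = suf :=
          (slice_eq_iff s suf L hL0 (hg _ hmem)).mpr he
        exact hc (by rw [this]; simpa using hmem)
      simp only [pvBLoop, hfind]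
      rw [if_neg (by rintro ⟨_, hc'⟩; exact hc hc')]
  · have hfind : (pvGroup L).find? (pvHit s) = none := by
      rw [List.find?_eq_none]
      intro suf hmem
      by_contra hne
      have hhit : pvHit s suf = true := by simpa using hne
      obtain ⟨_, h2⟩ := (pvHit_iff s suf).mp hhit
      obtain ⟨_, h2⟩ := (pvHit_iff s suf).mp hhit
      rw [PySem.Str.len_eq suf, hg _ hmem] at h2
      exact hlen h2
    simp only [pvBLoop, hfind]
    rw [if_neg (by rintro ⟨hl', _⟩; exact hlen hl')]

-- mutual exclusivity of "blk" with "blka"/"blkb"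
theorem not_hit_blk4 {s : String} (h : PySem.Str.endswith s "blk" = true)
    (v : String) (hge : "blk".toList.length ≤ v.toList.length)
    (hv : ¬ "blk".toList <:+ v.toList) : pvHit s v = false := by
  by_contra hne
  have hhit : pvHit s v = true := by simpa using hne
  obtain ⟨he, _⟩ := (pvHit_iff s v).mp hhit
  exact hv (List.suffix_of_suffix_length_le (endswith_suffix h) (endswith_suffix he) hge)

theorem main_eq (s : String) : get_base_rom_name s = get_base_rom_name_alt s := by
  have hA := aLoop_eq s pvSuffixesA (by decide)
  rw [get_base_rom_name, get_base_rom_name_alt, hA]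
  rw [bLoop_cons s 4 _ (by omega) (by decide),
      bLoop_cons s 3 _ (by omega) (by decide),
      bLoop_cons s 2 _ (by omega) (by decide),
      bLoop_cons s 1 _ (by omega) (by decide)]
  have hsplit : pvSuffixesA = "blk" :: "blka" :: "blkb" :: (pvGroup 2 ++ pvGroup 1) := by decide
  have g4 : pvGroup 4 = ["blka", "blkb"] := rfl
  have g3 : pvGroup 3 = ["blk"] := rfl
  rw [hsplit, g4, g3]
  by_cases h3 : pvHit s "blk" = true
  · have he3 : PySem.Str.endswith s "blk" = true := ((pvHit_iff s "blk").mp h3).1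
    have e4a : pvHit s "blka" = false := not_hit_blk4 he3 "blka" (by decide) (by decide)
    have e4b : pvHit s "blkb" = false := not_hit_blk4 he3 "blkb" (by decide) (by decide)
    simp [h3, e4a, e4b]
  · rw [Bool.not_eq_true] at h3
    by_cases h4a : pvHit s "blka" = true
    · simp [h3, h4a]
    · rw [Bool.not_eq_true] at h4a
      by_cases h4b : pvHit s "blkb" = true
      · simp [h3, h4a, h4b]
      · rw [Bool.not_eq_true] at h4b
        simp only [List.find?_cons, h3, h4a, h4b]
        rw [List.find?_append]
        cases hf2 : List.find? (pvHit s) (pvGroup 2) with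
        | some suf => simp
        | none => simp [pvBLoop]

-- ===== VERDICT (by name: the statement is the Claim_ definition above) =====
theorem get_base_rom_name_spec : Claim_equal_get_base_rom_name := by
  intro rom_name _
  unfold Spec_get_base_rom_name
  exact main_eq rom_name
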